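-- pv_equiv track=rewrite | github.com/josd/josd.github.io | brains/cases/family.py | compute_siblings
-- ===== SOURCE A (Python) =====
-- from typing import Dict, Iterable, List, Set, Tuple
--
-- Pair = Tuple[str, str]
--
-- def compute_siblings(parent: Set[Pair]) -> Set[Pair]:
--     """
--     siblings(x,y) iff ∃p: parent(p,x) ∧ parent(p,y).
--
--     This is *permissive*: siblings(x,x) can appear; the public siblings(x)
--     API will exclude x itself. That mirrors the original logic case.
--     """
--     # parent_children[p] = {c1, c2, ...}
--     parent_children: Dict[str, Set[str]] = {}
--     for p, c in parent:
--         parent_children.setdefault(p, set()).add(c)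
--
--     sibs: Set[Pair] = set()
--     for p, children in parent_children.items():
--         kids = list(children)
--         for i in range(len(kids)):
--             for j in range(len(kids)):
--                 sibs.add((kids[i], kids[j]))
--     return sibs
-- ===== SOURCE B (Python) =====
-- def compute_siblings(parent):
--     """
--     siblings(x,y) iff exists p: parent(p,x) and parent(p,y).
--
--     Dict-free formulation: a direct self-join over the parent relation,
--     grouped by each distinct parent via repeated scans of the relation.
--     """
--     return {
--         (c1, c2)
--         for p in {q for (q, _) in parent}
--         for (q1, c1) in parent if q1 == p
--         for (q2, c2) in parent if q2 == p
--     }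
-- ===== Notes on version B (the rewrite author's own statement) =====
-- stated objective: simpler
-- what changed: Drops the parent->children dict and the index-based double loop over each child list; B computes the sibling set as one comprehension: a self-join of the parent relation grouped by each distinct parent, rescanning the relation instead of maintaining a grouping dict.
import Mathlib
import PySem

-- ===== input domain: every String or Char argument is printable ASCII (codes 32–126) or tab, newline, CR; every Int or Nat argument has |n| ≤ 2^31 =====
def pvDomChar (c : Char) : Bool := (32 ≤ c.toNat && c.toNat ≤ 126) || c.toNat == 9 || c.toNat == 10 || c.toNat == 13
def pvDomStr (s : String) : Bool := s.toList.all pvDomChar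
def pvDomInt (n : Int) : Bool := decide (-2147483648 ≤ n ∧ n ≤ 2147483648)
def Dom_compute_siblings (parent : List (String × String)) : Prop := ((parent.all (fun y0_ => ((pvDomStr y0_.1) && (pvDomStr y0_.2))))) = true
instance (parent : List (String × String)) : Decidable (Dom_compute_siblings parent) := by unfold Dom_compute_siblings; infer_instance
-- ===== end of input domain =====

-- B replaces A's parent→children dict + index double loop by one self-join comprehension
-- over the parent relation, grouped by each distinct parent (objective: simpler).

-- ===== PORT A =====
def compute_siblings (parent : List (String × String)) : List (String × String) :=
  -- parent_children[p] = {c1, c2, ...} ; setdefault(p, set()).add(c) = modify p ∅ (·.add c)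
  let parent_children : PySem.Dict String (PySem.Set String) :=
    parent.foldl (fun d pc => d.modify pc.1 PySem.Set.empty (fun s => s.add pc.2)) PySem.Dict.empty
  parent_children.items.foldl (fun sibs pch =>
    let kids : List String := pch.2
    (PySem.List.pyRange 0 (kids.length : Int)).foldl (fun s i =>
      (PySem.List.pyRange 0 (kids.length : Int)).foldl (fun s j =>
        PySem.Set.add s (PySem.List.pyGetD kids i "", PySem.List.pyGetD kids j "")) s) sibs)
    PySem.Set.empty

-- ===== PORT B =====
def compute_siblings_alt (parent : List (String × String)) : List (String × String) :=
  let parents : PySem.Set String := PySem.Set.ofList (parent.map (fun pc => pc.1))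
  parents.foldl (fun sibs p =>
    parent.foldl (fun s pc1 =>
      if pc1.1 == p then
        parent.foldl (fun s' pc2 =>
          if pc2.1 == p then PySem.Set.add s' (pc1.2, pc2.2) else s') s
      else s) sibs) PySem.Set.empty

-- ===== PRECONDITION & SPEC =====
def Spec_compute_siblings (parent : List (String × String)) (out : List (String × String)) : Prop := out = compute_siblings_alt parent
instance (parent : List (String × String)) (out : List (String × String)) : Decidable (Spec_compute_siblings parent out) := by unfold Spec_compute_siblings; infer_instance

-- ===== CLAIM (what is proved, stated in full; the proofs are below) =====
def Claim_equal_compute_siblings : Prop := ∀ (parent : List (String × String)), Dom_compute_siblings parent → Spec_compute_siblings parent (compute_siblings parent)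

-- ===== LEMMAS AND PROOFS =====

-- s.update [y] is s.add y (definitional)
theorem pv_update_singleton {β : Type} [BEq β] (s : PySem.Set β) (y : β) :
    s.update [y] = s.add y := rfl

-- updating with elements already present is a no-op
theorem pv_update_absorb {β : Type} [BEq β] [LawfulBEq β] (m : List β) :
    ∀ (s : PySem.Set β), (∀ y ∈ m, y ∈ s) → s.update m = s := by
  induction m with
  | nil => intro s _; exact PySem.Set.update_nil s
  | cons x m ih =>
    intro s h
    rw [PySem.Set.update_cons, PySem.Set.add_of_mem (h x (by simp))]
    exact ih s (fun y hy => h y (by simp [hy]))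

-- skipping (later) occurrences of x is a no-op once g x is already in the state
theorem pv_foldl_update_discard {α β : Type} [BEq α] [LawfulBEq α] [BEq β] [LawfulBEq β]
    (g : α → List β) (x : α) :
    ∀ (m : List α) (t : PySem.Set β), (∀ y ∈ g x, y ∈ t) →
      ((m.filter (fun z => !(z == x))).foldl (fun s z => s.update (g z)) t
        = m.foldl (fun s z => s.update (g z)) t) := by
  intro m
  induction m with
  | nil => intro t _; rfl
  | cons z m ih =>
    intro t ht
    by_cases hz : z = x
    · subst hz
      simp only [List.filter_cons, beq_self_eq_true, Bool.not_true, Bool.false_eq_true,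
        if_false, List.foldl_cons, pv_update_absorb (g z) t ht]
      exact ih t ht
    · have hne : (!(z == x)) = true := by simp [hz]
      simp only [List.filter_cons, hne, if_true, List.foldl_cons]
      exact ih (t.update (g z)) (fun y hy => (PySem.Set.mem_update t (g z) y).2 (Or.inl (ht y hy)))

-- folding set-updates over ofList l equals folding them over l (duplicates are no-ops)
theorem pv_foldl_update_ofList {α β : Type} [BEq α] [LawfulBEq α] [BEq β] [LawfulBEq β]
    (g : α → List β) :
    ∀ (l : List α) (s : PySem.Set β),
      (PySem.Set.ofList l).foldl (fun s x => s.update (g x)) s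
        = l.foldl (fun s x => s.update (g x)) s := by
  intro l
  induction l with
  | nil => intro s; rfl
  | cons x l ih =>
    intro s
    rw [PySem.Set.ofList_cons, List.foldl_cons, List.foldl_cons]
    have hsub : ∀ y ∈ g x, y ∈ s.update (g x) :=
      fun y hy => (PySem.Set.mem_update s (g x) y).2 (Or.inr hy)
    calc ((PySem.Set.ofList l).discard x).foldl (fun s x => s.update (g x)) (s.update (g x))
        = (PySem.Set.ofList l).foldl (fun s x => s.update (g x)) (s.update (g x)) := by
          simpa [PySem.Set.discard] using
            pv_foldl_update_discard g x (PySem.Set.ofList l) (s.update (g x)) hsub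
      _ = l.foldl (fun s x => s.update (g x)) (s.update (g x)) := ih _

-- a guarded fold is a fold over the filtered, mapped list
theorem pv_foldl_if_filter {β γ σ : Type} (P : β → Bool) (f : β → γ) (G : σ → γ → σ) :
    ∀ (l : List β) (init : σ),
      l.foldl (fun s pc => if P pc then G s (f pc) else s) init
        = ((l.filter P).map f).foldl G init := by
  intro l
  induction l with
  | nil => intro init; rfl
  | cons pc l ih =>
    intro init
    by_cases h : P pc
    · simp only [List.foldl_cons, List.filter_cons, h, if_true, List.map_cons]
      exact ih _
    · simp only [List.foldl_cons, List.filter_cons, h, Bool.false_eq_true, if_false]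
      exact ih _

-- update by a mapped ofList equals update by the mapped raw list
theorem pv_update_map_ofList {α β : Type} [BEq α] [LawfulBEq α] [BEq β] [LawfulBEq β]
    (m : List α) (f : α → β) (s : PySem.Set β) :
    s.update ((PySem.Set.ofList m).map f) = s.update (m.map f) := by
  rw [PySem.Set.update_map_eq_foldl_add, PySem.Set.update_map_eq_foldl_add]
  have h1 : ∀ (l : List α) (t : PySem.Set β),
      l.foldl (fun s b => s.add (f b)) t = l.foldl (fun s b => s.update [f b]) t := by
    intro l t
    simp only [pv_update_singleton]
  rw [h1, h1]
  exact pv_foldl_update_ofList (fun b => [f b]) m s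

-- the canonical per-parent double loop
def pvCan (mp : List String) (sibs : PySem.Set (String × String)) : PySem.Set (String × String) :=
  mp.foldl (fun s c1 => s.update (mp.map (fun c2 => (c1, c2)))) sibs

-- the value of A's grouping dict at key p
theorem pv_dict_getD (l : List (String × String)) :
    ∀ (d : PySem.Dict String (PySem.Set String)) (p : String),
      (l.foldl (fun d pc => d.modify pc.1 PySem.Set.empty (fun s => s.add pc.2)) d).getD p PySem.Set.empty
        = (d.getD p PySem.Set.empty).update ((l.filter (fun pc => pc.1 == p)).map (fun pc => pc.2)) := by
  induction l with
  | nil => intro d p; simp [PySem.Set.update_nil]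
  | cons pc l ih =>
    intro d p
    rw [List.foldl_cons, ih]
    by_cases hp : pc.1 = p
    · simp [hp, PySem.Set.update_cons]
    · have : (pc.1 == p) = false := by simp [hp]
      simp [this, PySem.Dict.getD_modify, Ne.symm hp]

-- A's inner double index loop over kids = ofList mp is the canonical double loop over mp
theorem pv_A_inner (mp : List String) (sibs : PySem.Set (String × String)) :
    (PySem.List.pyRange 0 ((PySem.Set.ofList mp).length : Int)).foldl (fun s i =>
      (PySem.List.pyRange 0 ((PySem.Set.ofList mp).length : Int)).foldl (fun s j =>
        s.add (PySem.List.pyGetD (PySem.Set.ofList mp) i "", PySem.List.pyGetD (PySem.Set.ofList mp) j "")) s) sibs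
      = pvCan mp sibs := by
  have hinner : ∀ (c1 : String) (s : PySem.Set (String × String)),
      (PySem.List.pyRange 0 ((PySem.Set.ofList mp).length : Int)).foldl (fun s j =>
        s.add (c1, PySem.List.pyGetD (PySem.Set.ofList mp) j "")) s
        = s.update ((PySem.Set.ofList mp).map (fun c2 => (c1, c2))) := by
    intro c1 s
    rw [PySem.List.foldl_pyRange_zero_pyGetD' (PySem.Set.ofList mp) ""
      (fun s c2 => s.add (c1, c2)) s, PySem.Set.update_map_eq_foldl_add]
  calc (PySem.List.pyRange 0 ((PySem.Set.ofList mp).length : Int)).foldl (fun s i =>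
      (PySem.List.pyRange 0 ((PySem.Set.ofList mp).length : Int)).foldl (fun s j =>
        s.add (PySem.List.pyGetD (PySem.Set.ofList mp) i "", PySem.List.pyGetD (PySem.Set.ofList mp) j "")) s) sibs
      = (PySem.Set.ofList mp).foldl (fun s c1 =>
          s.update ((PySem.Set.ofList mp).map (fun c2 => (c1, c2)))) sibs := by
        simp only [hinner]
        exact PySem.List.foldl_pyRange_zero_pyGetD' (PySem.Set.ofList mp) ""
          (fun s c1 => s.update ((PySem.Set.ofList mp).map (fun c2 => (c1, c2)))) sibs
    _ = (PySem.Set.ofList mp).foldl (fun s c1 => s.update (mp.map (fun c2 => (c1, c2)))) sibs := by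
        simp only [pv_update_map_ofList]
    _ = pvCan mp sibs := pv_foldl_update_ofList (fun c1 => mp.map (fun c2 => (c1, c2))) mp sibs

-- B's guarded double scan for parent p is the canonical double loop over p's children
theorem pv_B_inner (parent : List (String × String)) (p : String)
    (sibs : PySem.Set (String × String)) :
    parent.foldl (fun s pc1 =>
      if pc1.1 == p then
        parent.foldl (fun s' pc2 =>
          if pc2.1 == p then PySem.Set.add s' (pc1.2, pc2.2) else s') s
      else s) sibs
      = pvCan ((parent.filter (fun pc => pc.1 == p)).map (fun pc => pc.2)) sibs := by
  have hinner : ∀ (c1 : String) (s : PySem.Set (String × String)),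
      parent.foldl (fun s' pc2 => if pc2.1 == p then s'.add (c1, pc2.2) else s') s
        = s.update (((parent.filter (fun pc => pc.1 == p)).map (fun pc => pc.2)).map (fun c2 => (c1, c2))) := by
    intro c1 s
    rw [pv_foldl_if_filter (fun pc => pc.1 == p) (fun pc => pc.2)
      (fun s' c2 => s'.add (c1, c2)) parent s, PySem.Set.update_map_eq_foldl_add]
  calc parent.foldl (fun s pc1 =>
      if pc1.1 == p then
        parent.foldl (fun s' pc2 =>
          if pc2.1 == p then PySem.Set.add s' (pc1.2, pc2.2) else s') s
      else s) sibs
      = parent.foldl (fun s pc1 =>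
          if pc1.1 == p then
            s.update (((parent.filter (fun pc => pc.1 == p)).map (fun pc => pc.2)).map (fun c2 => (pc1.2, c2)))
          else s) sibs := by
        simp only [hinner]
    _ = pvCan ((parent.filter (fun pc => pc.1 == p)).map (fun pc => pc.2)) sibs := by
        rw [pv_foldl_if_filter (fun pc => pc.1 == p) (fun pc => pc.2)
          (fun s c1 => s.update (((parent.filter (fun pc => pc.1 == p)).map (fun pc => pc.2)).map (fun c2 => (c1, c2)))) parent sibs]
        rfl

-- ===== VERDICT (by name: the statement is the Claim_ definition above) =====
theorem compute_siblings_spec : Claim_equal_compute_siblings := by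
  intro parent _
  unfold Spec_compute_siblings compute_siblings compute_siblings_alt
  have hkeys : (parent.foldl (fun d pc => d.modify pc.1 PySem.Set.empty (fun s => PySem.Set.add s pc.2)) PySem.Dict.empty).keys
      = PySem.Set.ofList (parent.map (fun pc => pc.1)) := by
    rw [PySem.Dict.keys_foldl_modify_key parent (fun pc => pc.1) PySem.Set.empty
      (fun _ pc s => PySem.Set.add s pc.2) PySem.Dict.empty]
    simp only [PySem.Dict.keys_empty]
    exact PySem.Set.update_empty _
  have hnodup : (parent.foldl (fun d pc => d.modify pc.1 PySem.Set.empty (fun s => PySem.Set.add s pc.2)) PySem.Dict.empty).keys.Nodup :=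
    PySem.Dict.nodup_keys_foldl_modify_key parent (fun pc => pc.1) PySem.Set.empty
      (fun _ pc s => PySem.Set.add s pc.2) PySem.Dict.empty (by simp)
  have hitems : (parent.foldl (fun d pc => d.modify pc.1 PySem.Set.empty (fun s => PySem.Set.add s pc.2)) PySem.Dict.empty).items
      = (PySem.Set.ofList (parent.map (fun pc => pc.1))).map
          (fun p => (p, PySem.Set.ofList ((parent.filter (fun pc => pc.1 == p)).map (fun pc => pc.2)))) := by
    rw [PySem.Dict.items_eq_map_keys _ hnodup PySem.Set.empty, hkeys]
    refine List.map_congr_left ?_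
    intro p _
    rw [pv_dict_getD parent PySem.Dict.empty p]
    simp only [PySem.Dict.getD_empty]
    rw [PySem.Set.update_empty]
  simp only [hitems, List.foldl_map]
  simp only [pv_A_inner, pv_B_inner]
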